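-- pv_equiv track=rewrite | github.com/JanEljasiak/LCS_project | Backend.py | build_successor_tables
-- ===== SOURCE A (Python) =====
-- def build_successor_tables(seqA, seqB):
--     seqAWithSpace, seqBWithSpace = " " + seqA, " " + seqB
--     colDimA, colDimB = len(seqAWithSpace), len(seqBWithSpace)
--     distinctLetters = "".join(dict.fromkeys(seqA + seqB))
--     rowDim = len(distinctLetters)
--     TseqA = [[-1 for col in range(colDimA)] for row in range(rowDim)]
--     TseqB = [[-1 for col in range(colDimB)] for row in range(rowDim)]
--     for i in range(rowDim):
--         for j in range(colDimA):
--             TseqA[i][j] = seqAWithSpace.find(distinctLetters[i], j+1)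
--         for j in range(colDimB):
--             TseqB[i][j] = seqBWithSpace.find(distinctLetters[i], j+1)
--     return TseqA, TseqB, rowDim
-- ===== SOURCE B (Python) =====
-- def build_successor_tables(seqA, seqB):
--     # One right-to-left pass per letter instead of a find() scan per cell.
--     def table(letters, s):
--         ws = " " + s
--         n = len(ws)
--         rows = []
--         for c in letters:
--             row = [0] * n
--             nxt = -1
--             for j in range(n - 1, -1, -1):
--                 row[j] = nxt
--                 if ws[j] == c:
--                     nxt = j
--             rows.append(row)
--         return rows
--     letters = list(dict.fromkeys(seqA + seqB))
--     return table(letters, seqA), table(letters, seqB), len(letters)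
-- ===== Notes on version B (the rewrite author's own statement) =====
-- stated objective: faster
-- what changed: Replaces the per-cell seq.find(letter, j+1) scan with a single right-to-left pass per letter that tracks the next occurrence index, filling each row in one sweep.
import Mathlib
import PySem

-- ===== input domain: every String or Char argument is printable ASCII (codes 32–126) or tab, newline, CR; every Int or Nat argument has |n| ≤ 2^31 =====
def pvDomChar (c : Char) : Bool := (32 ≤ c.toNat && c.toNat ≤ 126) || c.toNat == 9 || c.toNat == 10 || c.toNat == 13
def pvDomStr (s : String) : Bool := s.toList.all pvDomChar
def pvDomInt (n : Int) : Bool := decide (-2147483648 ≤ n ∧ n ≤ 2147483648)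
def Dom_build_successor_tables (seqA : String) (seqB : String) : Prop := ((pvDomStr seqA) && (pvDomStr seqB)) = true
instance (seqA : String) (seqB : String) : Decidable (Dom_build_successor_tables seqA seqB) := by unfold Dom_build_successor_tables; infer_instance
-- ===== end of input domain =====

-- B replaces the per-cell find() scan by one right-to-left pass per letter (asymptotically faster).

-- ===== PORT A =====
-- " "+seq is ported as ' ' :: seq.toList; "".join(dict.fromkeys(seqA+seqB)) is PySem.List.dedup;
-- the loop 'for i in range(rowDim): ... distinctLetters[i]' is the map over the dedup list in order.
def build_successor_tables (seqA : String) (seqB : String) : List (List Int) × List (List Int) × Int :=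
  let seqAWithSpace : List Char := ' ' :: seqA.toList
  let seqBWithSpace : List Char := ' ' :: seqB.toList
  let colDimA := seqAWithSpace.length
  let colDimB := seqBWithSpace.length
  let distinctLetters : List Char := PySem.List.dedup (seqA.toList ++ seqB.toList)
  let rowDim := distinctLetters.length
  let TseqA := distinctLetters.map (fun c =>
    (List.range colDimA).map (fun (j : Nat) => PySem.Chars.findFrom seqAWithSpace [c] ((j : Int) + 1) none))
  let TseqB := distinctLetters.map (fun c =>
    (List.range colDimB).map (fun (j : Nat) => PySem.Chars.findFrom seqBWithSpace [c] ((j : Int) + 1) none))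
  (TseqA, TseqB, (rowDim : Int))

-- ===== PORT B =====
-- the right-to-left pass: processes the suffix first, returning (row of the suffix, index of the
-- first occurrence of c at absolute position ≥ j), j being the absolute index of the list head
def rowOf (c : Char) (j : Nat) : List Char → List Int × Int
  | [] => ([], -1)
  | x :: xs =>
    let r := rowOf c (j + 1) xs
    (r.2 :: r.1, if x == c then (j : Int) else r.2)

def build_successor_tables_alt (seqA : String) (seqB : String) : List (List Int) × List (List Int) × Int :=
  let letters : List Char := PySem.List.dedup (seqA.toList ++ seqB.toList)
  (letters.map (fun c => (rowOf c 0 (' ' :: seqA.toList)).1),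
   letters.map (fun c => (rowOf c 0 (' ' :: seqB.toList)).1),
   (letters.length : Int))

-- ===== PRECONDITION & SPEC =====
def Spec_build_successor_tables (seqA : String) (seqB : String) (out : List (List Int) × List (List Int) × Int) : Prop := out = build_successor_tables_alt seqA seqB
instance (seqA : String) (seqB : String) (out : List (List Int) × List (List Int) × Int) : Decidable (Spec_build_successor_tables seqA seqB out) := by unfold Spec_build_successor_tables; infer_instance

-- ===== CLAIM (what is proved, stated in full; the proofs are below) =====
def Claim_equal_build_successor_tables : Prop := ∀ (seqA : String) (seqB : String), Dom_build_successor_tables seqA seqB → Spec_build_successor_tables seqA seqB (build_successor_tables seqA seqB)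

-- ===== LEMMAS AND PROOFS =====

theorem rowOf_fst_length (c : Char) (j : Nat) (l : List Char) :
    (rowOf c j l).1.length = l.length := by
  induction l generalizing j with
  | nil => rfl
  | cons x xs ih => simp [rowOf, ih]

theorem rowOf_snd (c : Char) (j : Nat) (l : List Char) :
    (rowOf c j l).2 = ((l.findIdx? (· == c)).map (fun (n : Nat) => ((j + n : Nat) : Int))).getD (-1) := by
  induction l generalizing j with
  | nil => rfl
  | cons x xs ih =>
    by_cases h : x = c
    · simp [rowOf, h, List.findIdx?_cons]
    · simp only [rowOf, List.findIdx?_cons, beq_iff_eq, h, if_false, ih (j + 1)]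
      cases hfi : xs.findIdx? (· == c) with
      | none => simp
      | some n => simp; omega

theorem rowOf_fst_getElem (c : Char) (j : Nat) (l : List Char) (i : Nat) (h : i < l.length) :
    (rowOf c j l).1[i]'(by rw [rowOf_fst_length]; exact h) =
      (rowOf c (j + i + 1) (l.drop (i + 1))).2 := by
  induction l generalizing j i with
  | nil => simp at h
  | cons x xs ih =>
    cases i with
    | zero => simp [rowOf]
    | succ i =>
      have h' : i < xs.length := by simpa using h
      simpa [rowOf, Nat.add_assoc, Nat.add_comm, Nat.add_left_comm] using ih (j + 1) i h'

theorem singleton_prefix_drop (c : Char) (l : List Char) (i : Nat) :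
    [c] <+: l.drop i ↔ l[i]? = some c := by
  rw [← List.head?_drop]
  cases hd : l.drop i with
  | nil => simp
  | cons y ys =>
    constructor
    · rintro ⟨t, ht⟩; simp at ht; simp [ht.1]
    · intro hy; simp at hy; exact ⟨ys, by simp [hy]⟩

theorem find_singleton (c : Char) (l : List Char) :
    PySem.Chars.find l [c] = ((l.findIdx? (· == c)).map (fun (n : Nat) => (n : Int))).getD (-1) := by
  cases hfi : l.findIdx? (· == c) with
  | none =>
    have hnm : c ∉ l := by
      intro hm
      have := List.findIdx?_eq_none_iff.mp hfi c hm
      simp at this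
    have hni : ¬ ([c] <:+: l) := fun hinf => hnm (hinf.mem (by simp))
    simp [(PySem.Chars.find_eq_neg_one_iff l [c]).mpr hni]
  | some n =>
    rcases List.findIdx?_eq_some_iff_getElem.mp hfi with ⟨hn, hp, hmin⟩
    have hcn : l[n]? = some c := by
      simp only [beq_iff_eq] at hp
      rw [List.getElem?_eq_getElem hn, hp]
    have hinf : [c] <:+: l := by
      have hmem : c ∈ l := List.mem_of_getElem? hcn
      rcases List.mem_iff_append.mp hmem with ⟨s, t, rfl⟩
      exact ⟨s, t, by simp⟩
    have hge : 0 ≤ PySem.Chars.find l [c] := (PySem.Chars.find_nonneg_iff l [c]).mpr hinf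
    rcases PySem.Chars.find_spec (s := l) (sub := [c]) hge with ⟨hpre, hlt⟩
    set f := (PySem.Chars.find l [c]).toNat with hf
    have hfc : l[f]? = some c := (singleton_prefix_drop c l f).mp hpre
    have h1 : ¬ n < f := fun hlt' => hlt n hlt' ((singleton_prefix_drop c l n).mpr hcn)
    have h2 : ¬ f < n := by
      intro hlt'
      have hflen : f < l.length := (List.getElem?_eq_some_iff.mp hfc).1
      have hne := hmin f hlt'
      rw [List.getElem?_eq_getElem hflen] at hfc
      simp only [Option.some.injEq] at hfc
      simp [hfc] at hne
    have hfn : f = n := by omega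
    have hred : ((Option.map (fun (n : Nat) => (n : Int)) (some n)).getD (-1)) = (n : Int) := rfl
    rw [hred]
    omega

theorem row_eq (c : Char) (l : List Char) :
    (List.range l.length).map (fun (j : Nat) => PySem.Chars.findFrom l [c] ((j : Int) + 1) none) =
      (rowOf c 0 l).1 := by
  apply List.ext_getElem
  · simp [rowOf_fst_length]
  · intro i h1 h2
    have hi : i < l.length := by simpa using h1
    have hk : i + 1 ≤ l.length := hi
    have hcast : ((i : Int) + 1) = ((i + 1 : Nat) : Int) := by push_cast; ring
    rw [List.getElem_map, List.getElem_range, rowOf_fst_getElem c 0 l i hi, hcast,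
      PySem.Chars.findFrom_natCast l [c] (i + 1) hk, rowOf_snd, find_singleton]
    cases hfi : (l.drop (i + 1)).findIdx? (· == c) with
    | none => simp
    | some n => simp

theorem build_successor_tables_spec' (seqA seqB : String) :
    build_successor_tables seqA seqB = build_successor_tables_alt seqA seqB := by
  unfold build_successor_tables build_successor_tables_alt
  refine congrArg₂ Prod.mk ?_ (congrArg₂ Prod.mk ?_ rfl)
  · exact List.map_congr_left fun c _ => row_eq c (' ' :: seqA.toList)
  · exact List.map_congr_left fun c _ => row_eq c (' ' :: seqB.toList)

-- ===== VERDICT (by name: the statement is the Claim_ definition above) =====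
theorem build_successor_tables_spec : Claim_equal_build_successor_tables := by
  intro seqA seqB _
  exact build_successor_tables_spec' seqA seqB
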